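-- pv_equiv track=rewrite | github.com/krwku/ku-ie-validator | utils/validation_adapter.py | build_passed_courses_history
-- ===== SOURCE A (Python) =====
-- def build_passed_courses_history(semesters):
--     """
--     Build a semester-by-semester history of all passed courses.
--
--     Args:
--         semesters: List of semester dictionaries
--
--     Returns:
--         List of dictionaries mapping course codes to grades
--     """
--     passing_grades = {"A", "B+", "B", "C+", "C", "D+", "D", "P"}
--     passed_courses_history = []
--     cumulative_passed = {}
--
--     # Build a cumulative history of passed courses
--     for semester in semesters:
--         # Start with all previously passed courses
--         semester_passed = dict(cumulative_passed)
--
--         # Add courses passed in this semester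
--         for course in semester.get("courses", []):
--             course_code = course.get("code", "")
--             grade = course.get("grade", "")
--
--             if grade in passing_grades:
--                 semester_passed[course_code] = grade
--                 cumulative_passed[course_code] = grade
--
--         passed_courses_history.append(semester_passed)
--
--     return passed_courses_history
-- ===== SOURCE B (Python) =====
-- def build_passed_courses_history(semesters):
--     """Stateless prefix recomputation: no cumulative accumulator; semester i's
--     snapshot is one dict comprehension over the flattened prefix semesters[:i+1]."""
--     passing_grades = {"A", "B+", "B", "C+", "C", "D+", "D", "P"}
--     return [
--         {course.get("code", ""): course.get("grade", "")
--          for semester in semesters[:i + 1]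
--          for course in semester.get("courses", [])
--          if course.get("grade", "") in passing_grades}
--         for i in range(len(semesters))
--     ]
-- ===== Notes on version B (the rewrite author's own statement) =====
-- stated objective: alternative
-- what changed: A is a single left-to-right pass threading a mutable cumulative dict (plus a per-semester copy updated in lockstep); B keeps no running state at all: each semester's snapshot is recomputed independently as one dict comprehension over the flattened prefix semesters[:i+1].
import Mathlib
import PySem

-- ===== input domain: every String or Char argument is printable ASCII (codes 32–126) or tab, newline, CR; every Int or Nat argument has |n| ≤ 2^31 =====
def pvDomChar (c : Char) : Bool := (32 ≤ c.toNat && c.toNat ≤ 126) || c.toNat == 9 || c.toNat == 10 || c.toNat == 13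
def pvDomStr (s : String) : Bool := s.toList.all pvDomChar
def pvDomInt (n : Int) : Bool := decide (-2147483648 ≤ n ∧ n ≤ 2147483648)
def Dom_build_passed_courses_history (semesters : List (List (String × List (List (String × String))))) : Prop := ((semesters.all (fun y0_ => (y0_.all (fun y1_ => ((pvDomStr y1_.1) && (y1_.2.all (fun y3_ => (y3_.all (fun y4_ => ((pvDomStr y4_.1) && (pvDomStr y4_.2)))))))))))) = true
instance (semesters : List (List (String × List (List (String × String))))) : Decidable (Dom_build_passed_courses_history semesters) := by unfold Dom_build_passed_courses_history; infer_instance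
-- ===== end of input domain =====

-- B drops A's running cumulative dict entirely and recomputes each semester's snapshot
-- independently from the flattened prefix semesters[:i+1]; objective: alternative (not faster).

def pvPassingGrades : PySem.Set String := PySem.Set.ofList ["A", "B+", "B", "C+", "C", "D+", "D", "P"]

-- ===== PORT A =====
-- inner course loop of A: updates semester_passed and cumulative in lockstep
def pvCoursePairStep (p : PySem.Dict String String × PySem.Dict String String)
    (course : List (String × String)) : PySem.Dict String String × PySem.Dict String String :=
  let course_code := (PySem.Dict.mk course).getD "code" ""
  let grade := (PySem.Dict.mk course).getD "grade" ""
  if pvPassingGrades.contains grade then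
    (p.1.insert course_code grade, p.2.insert course_code grade)
  else p

def pvSemesterStepA (st : List (List (String × String)) × PySem.Dict String String)
    (semester : List (String × List (List (String × String)))) :
    List (List (String × String)) × PySem.Dict String String :=
  -- semester_passed = dict(cumulative); then the course loop mutates both dicts
  let inner := ((PySem.Dict.mk semester).getD "courses" []).foldl pvCoursePairStep (st.2, st.2)
  (st.1 ++ [inner.1.items], inner.2)

def build_passed_courses_history (semesters : List (List (String × List (List (String × String))))) : List (List (String × String)) :=
  (semesters.foldl pvSemesterStepA ([], PySem.Dict.empty)).1

-- ===== PORT B =====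
-- semester.get("courses", [])
def pvCoursesOf (semester : List (String × List (List (String × String)))) : List (List (String × String)) :=
  (PySem.Dict.mk semester).getD "courses" []

-- one filtered insertion of the dict comprehension
def pvCourseStep (d : PySem.Dict String String) (course : List (String × String)) : PySem.Dict String String :=
  if pvPassingGrades.contains ((PySem.Dict.mk course).getD "grade" "") then
    d.insert ((PySem.Dict.mk course).getD "code" "") ((PySem.Dict.mk course).getD "grade" "")
  else d

-- the dict comprehension over the flattened prefix (for semester in pre for course in …)
def pvSnapshot (pre : List (List (String × List (List (String × String))))) : List (String × String) :=
  ((pre.flatMap pvCoursesOf).foldl pvCourseStep PySem.Dict.empty).items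

-- `for i in range(len(semesters))` over Nat indices and `semesters[:i+1]` = take (i+1)
-- (exact: i ≥ 0 and i+1 ≥ 0, so Python's slice is a plain prefix)
def build_passed_courses_history_alt (semesters : List (List (String × List (List (String × String))))) : List (List (String × String)) :=
  (List.range semesters.length).map (fun i => pvSnapshot (semesters.take (i + 1)))

-- ===== PRECONDITION & SPEC =====
def Spec_build_passed_courses_history (semesters : List (List (String × List (List (String × String))))) (out : List (List (String × String))) : Prop := out = build_passed_courses_history_alt semesters
instance (semesters : List (List (String × List (List (String × String))))) (out : List (List (String × String))) : Decidable (Spec_build_passed_courses_history semesters out) := by unfold Spec_build_passed_courses_history; infer_instance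

-- ===== CLAIM (what is proved, stated in full; the proofs are below) =====
def Claim_equal_build_passed_courses_history : Prop := ∀ (semesters : List (List (String × List (List (String × String))))), Dom_build_passed_courses_history semesters → Spec_build_passed_courses_history semesters (build_passed_courses_history semesters)

-- ===== LEMMAS AND PROOFS =====

-- A's lockstep pair loop keeps both components equal
theorem pv_pair_eq (courses : List (List (String × String))) :
    ∀ c : PySem.Dict String String,
    courses.foldl pvCoursePairStep (c, c) = (courses.foldl pvCourseStep c, courses.foldl pvCourseStep c) := by
  induction courses with
  | nil => intro c; rfl
  | cons c cs ih =>
    intro d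
    simp only [List.foldl_cons, pvCoursePairStep, pvCourseStep]
    split
    · exact ih _
    · exact ih _

-- folding over a flattened list = folding semester by semester
theorem pv_foldl_flat (l : List (List (String × List (List (String × String))))) :
    ∀ c : PySem.Dict String String,
    (l.flatMap pvCoursesOf).foldl pvCourseStep c
      = l.foldl (fun d s => (pvCoursesOf s).foldl pvCourseStep d) c := by
  induction l with
  | nil => intro c; rfl
  | cons s ss ih =>
    intro c
    simp only [List.flatMap_cons, List.foldl_append, List.foldl_cons, ih]

theorem pv_main (sems : List (List (String × List (List (String × String))))) :
    ∀ (hist : List (List (String × String))) (c : PySem.Dict String String),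
    (sems.foldl pvSemesterStepA (hist, c)).1
      = hist ++ (List.range sems.length).map
          (fun i => (((sems.take (i + 1)).flatMap pvCoursesOf).foldl pvCourseStep c).items) := by
  induction sems with
  | nil => intro hist c; simp
  | cons s ss ih =>
    intro hist c
    have hg : pvSemesterStepA (hist, c) s
        = (hist ++ [((pvCoursesOf s).foldl pvCourseStep c).items], (pvCoursesOf s).foldl pvCourseStep c) := by
      simp only [pvSemesterStepA, pvCoursesOf, pv_pair_eq]
    simp only [List.foldl_cons, hg, ih, List.length_cons, List.range_succ_eq_map,
      List.map_cons, List.map_map]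
    simp [Function.comp, List.foldl_append, pv_foldl_flat, List.append_assoc]

-- ===== VERDICT (by name: the statement is the Claim_ definition above) =====
theorem build_passed_courses_history_spec : Claim_equal_build_passed_courses_history := by
  intro semesters _
  unfold Spec_build_passed_courses_history build_passed_courses_history build_passed_courses_history_alt
  rw [pv_main semesters [] PySem.Dict.empty]
  simp [pvSnapshot]
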